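-- pv_equiv track=rewrite | github.com/goldhaxx/fucina | tools/breadboard.py | resistor_bands
-- ===== SOURCE A (Python) =====
-- BAND_DIGIT = {
--     0: "#000", 1: "#8B4513", 2: "#FF0000", 3: "#FF8C00",
--     4: "#FFD700", 5: "#228B22", 6: "#0000FF", 7: "#8B00FF",
--     8: "#808080", 9: "#FFF",
-- }
--
-- BAND_MULTIPLIER = {
--     1: "#000", 10: "#8B4513", 100: "#FF0000",
--     1000: "#FF8C00", 10000: "#FFD700", 100000: "#228B22",
--     1000000: "#0000FF",
-- }
--
-- BAND_TOLERANCE_GOLD = "#CFB53B"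
--
-- def resistor_bands(ohms: int) -> list[str]:
--     if ohms <= 0:
--         return ["#000"] * 4
--     sig, mult = ohms, 1
--     while sig >= 100:
--         sig //= 10
--         mult *= 10
--     return [
--         BAND_DIGIT.get(sig // 10, "#000"),
--         BAND_DIGIT.get(sig % 10, "#000"),
--         BAND_MULTIPLIER.get(mult, "#000"),
--         BAND_TOLERANCE_GOLD,
--     ]
-- ===== SOURCE B (Python) =====
-- BAND_DIGIT = {
--     0: "#000", 1: "#8B4513", 2: "#FF0000", 3: "#FF8C00",
--     4: "#FFD700", 5: "#228B22", 6: "#0000FF", 7: "#8B00FF",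
--     8: "#808080", 9: "#FFF",
-- }
--
-- BAND_MULTIPLIER = {
--     1: "#000", 10: "#8B4513", 100: "#FF0000",
--     1000: "#FF8C00", 10000: "#FFD700", 100000: "#228B22",
--     1000000: "#0000FF",
-- }
--
-- BAND_TOLERANCE_GOLD = "#CFB53B"
--
-- def resistor_bands(ohms: int) -> list[str]:
--     if ohms <= 0:
--         return ["#000"] * 4
--     # peel out the full digit list (least significant first), then read
--     # the two leading digits off its end; the multiplier is a power of ten
--     # determined by the digit count.
--     digits = []
--     n = ohms
--     while n:
--         digits.append(n % 10)
--         n //= 10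
--     if len(digits) == 1:
--         d1, d2, mult = 0, digits[0], 1
--     else:
--         d1, d2 = digits[-1], digits[-2]
--         mult = 10 ** (len(digits) - 2)
--     return [
--         BAND_DIGIT.get(d1, "#000"),
--         BAND_DIGIT.get(d2, "#000"),
--         BAND_MULTIPLIER.get(mult, "#000"),
--         BAND_TOLERANCE_GOLD,
--     ]
-- ===== Notes on version B (the rewrite author's own statement) =====
-- stated objective: alternative
-- what changed: B replaces A's in-place while-loop normalization (repeatedly dividing sig by ten while accumulating mult) by first building the full digit list of ohms and then reading the two leading digits off its end, with the multiplier computed as a power of ten from the digit count.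
import Mathlib
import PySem

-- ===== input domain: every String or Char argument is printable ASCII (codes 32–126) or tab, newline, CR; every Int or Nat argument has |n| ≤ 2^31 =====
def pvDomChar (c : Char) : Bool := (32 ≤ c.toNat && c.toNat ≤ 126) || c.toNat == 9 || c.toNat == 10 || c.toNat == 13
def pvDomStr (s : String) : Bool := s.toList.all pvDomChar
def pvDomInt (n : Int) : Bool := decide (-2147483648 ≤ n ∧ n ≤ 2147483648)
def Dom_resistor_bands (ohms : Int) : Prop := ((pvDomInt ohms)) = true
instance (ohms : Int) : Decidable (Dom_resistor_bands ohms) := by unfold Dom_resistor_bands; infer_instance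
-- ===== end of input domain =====

-- B replaces A's while-loop normalization by building the full digit list and reading
-- the two leading digits off its end (objective: alternative decomposition, same cost).

-- shared module constants (BAND_DIGIT, BAND_MULTIPLIER, BAND_TOLERANCE_GOLD)
def pvBandDigit : PySem.Dict Int String := PySem.Dict.ofList
  [(0, "#000"), (1, "#8B4513"), (2, "#FF0000"), (3, "#FF8C00"),
   (4, "#FFD700"), (5, "#228B22"), (6, "#0000FF"), (7, "#8B00FF"),
   (8, "#808080"), (9, "#FFF")]

def pvBandMultiplier : PySem.Dict Int String := PySem.Dict.ofList
  [(1, "#000"), (10, "#8B4513"), (100, "#FF0000"),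
   (1000, "#FF8C00"), (10000, "#FFD700"), (100000, "#228B22"),
   (1000000, "#0000FF")]

def pvBandToleranceGold : String := "#CFB53B"

-- ===== PORT A =====
-- `while sig >= 100: sig //= 10; mult *= 10`
def pvLoopA (sig mult : Int) : Int × Int :=
  if 100 ≤ sig then pvLoopA (PySem.Int.floordiv sig 10) (mult * 10) else (sig, mult)
termination_by sig.toNat
decreasing_by
  rw [PySem.Int.floordiv_eq_ediv_of_pos (by norm_num)]
  omega

def resistor_bands (ohms : Int) : List String :=
  if ohms ≤ 0 then ["#000", "#000", "#000", "#000"]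
  else
    let p := pvLoopA ohms 1
    [pvBandDigit.getD (PySem.Int.floordiv p.1 10) "#000",
     pvBandDigit.getD (PySem.Int.mod p.1 10) "#000",
     pvBandMultiplier.getD p.2 "#000",
     pvBandToleranceGold]

-- ===== PORT B =====
-- `while n: digits.append(n % 10); n //= 10`, built least-significant first.
-- (Python's loop is only reached with n ≥ 1; the `n ≤ 0` guard just makes the
-- recursion total — on n = 0 it agrees with Python's empty loop.)
def pvDigits (n : Int) : List Int :=
  if _h : n ≤ 0 then []
  else PySem.Int.mod n 10 :: pvDigits (PySem.Int.floordiv n 10)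
termination_by n.toNat
decreasing_by
  rw [PySem.Int.floordiv_eq_ediv_of_pos (by norm_num)]
  omega

def resistor_bands_alt (ohms : Int) : List String :=
  if ohms ≤ 0 then ["#000", "#000", "#000", "#000"]
  else
    let digits := pvDigits ohms
    let t : Int × Int × Int :=
      if digits.length = 1 then (0, (PySem.List.pyGet? digits 0).getD 0, 1)
      else ((PySem.List.pyGet? digits (-1)).getD 0,
            (PySem.List.pyGet? digits (-2)).getD 0,
            (10 : Int) ^ (digits.length - 2))
    [pvBandDigit.getD t.1 "#000",
     pvBandDigit.getD t.2.1 "#000",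
     pvBandMultiplier.getD t.2.2 "#000",
     pvBandToleranceGold]

-- ===== PRECONDITION & SPEC =====
def Spec_resistor_bands (ohms : Int) (out : List String) : Prop := out = resistor_bands_alt ohms
instance (ohms : Int) (out : List String) : Decidable (Spec_resistor_bands ohms out) := by unfold Spec_resistor_bands; infer_instance

-- ===== CLAIM (what is proved, stated in full; the proofs are below) =====
def Claim_equal_resistor_bands : Prop := ∀ (ohms : Int), Dom_resistor_bands ohms → Spec_resistor_bands ohms (resistor_bands ohms)

-- ===== LEMMAS AND PROOFS =====

-- B's digit list is Mathlib's base-10 digit list (least significant first), cast to Int.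
theorem pvDigits_natCast : ∀ (m : Nat), pvDigits (m : Int) = (Nat.digits 10 m).map (fun d : Nat => (d : Int)) := by
  intro m
  induction m using Nat.strong_induction_on with
  | _ m ih =>
    rw [pvDigits]
    rcases Nat.eq_zero_or_pos m with h0 | h0
    · subst h0; simp
    · have h1 : ¬ ((m : Int) ≤ 0) := by omega
      rw [dif_neg h1, PySem.Int.floordiv_eq_ediv_of_pos (by norm_num),
          PySem.Int.mod_eq_emod_of_pos (by norm_num)]
      have e1 : (m : Int) / 10 = ((m / 10 : Nat) : Int) := by omega
      have e2 : (m : Int) % 10 = ((m % 10 : Nat) : Int) := by omega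
      rw [e1, e2, ih (m / 10) (Nat.div_lt_self h0 (by norm_num)),
          Nat.digits_def' (by norm_num : 1 < 10) h0]
      simp

-- digit extraction from Mathlib's digit list
theorem digits_getElem : ∀ (m : Nat), ∀ (i : Nat) (h : i < (Nat.digits 10 m).length),
    (Nat.digits 10 m)[i] = m / 10 ^ i % 10 := by
  intro m
  induction m using Nat.strong_induction_on with
  | _ m ih =>
    intro i h
    rcases Nat.eq_zero_or_pos m with h0 | h0
    · subst h0; simp at h
    · simp only [Nat.digits_def' (by norm_num : 1 < 10) h0] at h ⊢
      cases i with
      | zero => simp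
      | succ i =>
        simp only [List.getElem_cons_succ]
        rw [ih (m / 10) (Nat.div_lt_self h0 (by norm_num)) i (by simpa using h),
            Nat.div_div_eq_div_mul]
        congr 2
        ring

theorem digits_len_le_two_of_lt_100 {m : Nat} (hm : 0 < m) (h : m < 100) :
    (Nat.digits 10 m).length ≤ 2 := by
  by_contra hc
  have h1 := Nat.base_pow_length_digits_le 10 m (by norm_num) (by omega)
  have h2 : (10 : Nat) ^ 3 ≤ 10 ^ (Nat.digits 10 m).length :=
    Nat.pow_le_pow_right (by norm_num) (by omega)
  simp at h2
  omega

theorem two_le_digits_len_of_le {m : Nat} (h : 10 ≤ m) :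
    2 ≤ (Nat.digits 10 m).length := by
  by_contra hc
  have h1 := Nat.lt_base_pow_length_digits (b := 10) (m := m) (by norm_num)
  have h2 : (10 : Nat) ^ (Nat.digits 10 m).length ≤ 10 ^ 1 :=
    Nat.pow_le_pow_right (by norm_num) (by omega)
  simp at h2
  omega

theorem lt_pow_digits_len (m : Nat) : m < 10 ^ (Nat.digits 10 m).length :=
  Nat.lt_base_pow_length_digits (by norm_num)

-- A's loop computes (m / 10^e, mult * 10^e) with e = (number of digits of m) - 2.
theorem pvLoopA_char : ∀ (m : Nat), 0 < m → ∀ (mu : Int),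
    pvLoopA (m : Int) mu =
      (((m / 10 ^ ((Nat.digits 10 m).length - 2) : Nat) : Int),
        mu * 10 ^ ((Nat.digits 10 m).length - 2)) := by
  intro m
  induction m using Nat.strong_induction_on with
  | _ m ih =>
    intro h0 mu
    rw [pvLoopA]
    by_cases h100 : 100 ≤ (m : Int)
    · have hm100 : 100 ≤ m := by exact_mod_cast h100
      rw [if_pos h100, PySem.Int.floordiv_eq_ediv_of_pos (by norm_num)]
      have e1 : (m : Int) / 10 = ((m / 10 : Nat) : Int) := by omega
      rw [e1, ih (m / 10) (Nat.div_lt_self h0 (by norm_num)) (by omega) (mu * 10)]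
      have hlen : (Nat.digits 10 m).length = (Nat.digits 10 (m / 10)).length + 1 := by
        rw [Nat.digits_def' (by norm_num : 1 < 10) h0]; simp
      have hlen2 : 2 ≤ (Nat.digits 10 (m / 10)).length :=
        two_le_digits_len_of_le (by omega)
      have he : (Nat.digits 10 m).length - 2 = ((Nat.digits 10 (m / 10)).length - 2) + 1 := by
        omega
      rw [he]
      refine Prod.ext ?_ ?_
      · show ((m / 10 / 10 ^ ((Nat.digits 10 (m / 10)).length - 2) : Nat) : Int) = _
        rw [Nat.div_div_eq_div_mul]
        congr 2
        rw [pow_succ]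
        ring
      · show mu * 10 * 10 ^ ((Nat.digits 10 (m / 10)).length - 2) = _
        rw [pow_succ]
        ring
    · have hm : m < 100 := by omega
      rw [if_neg h100]
      have he : (Nat.digits 10 m).length - 2 = 0 := by
        have := digits_len_le_two_of_lt_100 h0 hm
        omega
      rw [he]
      simp

theorem pvDigits_length (m : Nat) : (pvDigits (m : Int)).length = (Nat.digits 10 m).length := by
  rw [pvDigits_natCast]
  simp

theorem pvDigits_getElem (m i : Nat) (h : i < (pvDigits (m : Int)).length) :
    (pvDigits (m : Int))[i] = ((m / 10 ^ i % 10 : Nat) : Int) := by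
  have hlen := pvDigits_length m
  have h2 : i < (Nat.digits 10 m).length := by omega
  rw [List.getElem_of_eq (pvDigits_natCast m) h]
  simp only [List.getElem_map]
  rw [digits_getElem m i h2]

-- ===== VERDICT (by name: the statement is the Claim_ definition above) =====
theorem resistor_bands_spec : Claim_equal_resistor_bands := by
  intro ohms _
  show resistor_bands ohms = resistor_bands_alt ohms
  unfold resistor_bands resistor_bands_alt
  by_cases h : ohms ≤ 0
  · simp [h]
  · rw [if_neg h, if_neg h]
    obtain ⟨m, rfl⟩ : ∃ m : Nat, ohms = (m : Int) := ⟨ohms.toNat, by omega⟩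
    have h0 : 0 < m := by omega
    have hmne : m ≠ 0 := by omega
    rw [pvLoopA_char m h0 1]
    set D := pvDigits (m : Int) with hDdef
    have hDlen : D.length = (Nat.digits 10 m).length := pvDigits_length m
    have hlen1 : 1 ≤ (Nat.digits 10 m).length :=
      List.length_pos_of_ne_nil (Nat.digits_ne_nil_iff_ne_zero.mpr hmne)
    have hDget : ∀ (i : Nat) (hi : i < D.length), D[i] = ((m / 10 ^ i % 10 : Nat) : Int) :=
      fun i hi => pvDigits_getElem m i hi
    set L := (Nat.digits 10 m).length with hLdef
    have hmlt : m < 10 ^ L := lt_pow_digits_len m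
    by_cases hL : L = 1
    · have hm10 : m < 10 := by
        have h10 := hmlt
        rw [hL] at h10
        simpa using h10
      have hcond : D.length = 1 := by omega
      have he0 : L - 2 = 0 := by omega
      have e3 : ((m : Int)) / 10 = 0 := by omega
      have e4 : ((m : Int)) % 10 = (m : Int) := by omega
      simp [hcond, he0, e3, e4]
      rw [hDget 0 (by omega)]
      simp [Nat.mod_eq_of_lt hm10]
    · have hL2 : 2 ≤ L := by omega
      have hdiv10 : m / 10 ^ (L - 1) < 10 := by
        apply Nat.div_lt_of_lt_mul
        calc m < 10 ^ L := hmlt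
        _ = 10 ^ (L - 1) * 10 := by rw [← pow_succ]; congr 1; omega
      have hlast : PySem.List.pyGet? D (-1) = some ((m / 10 ^ (L - 1) : Nat) : Int) := by
        rw [PySem.List.pyGet?_neg_one, List.getLast?_eq_getElem?,
            List.getElem?_eq_getElem (by omega), hDget (D.length - 1) (by omega)]
        have e : D.length - 1 = L - 1 := by omega
        rw [e, Nat.mod_eq_of_lt hdiv10]
      have hsnd : PySem.List.pyGet? D (-2) = some ((m / 10 ^ (L - 2) % 10 : Nat) : Int) := by
        rw [PySem.List.pyGet?_neg_ofNat D 2 (by norm_num) (by omega),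
            List.getElem?_eq_getElem (by omega), hDget (D.length - 2) (by omega)]
        have e : D.length - 2 = L - 2 := by omega
        rw [e]
      have eA1 : PySem.Int.floordiv ((m / 10 ^ (L - 2) : Nat) : Int) 10 = ((m / 10 ^ (L - 1) : Nat) : Int) := by
        rw [PySem.Int.floordiv_eq_ediv_of_pos (by norm_num)]
        have : (m / 10 ^ (L - 2)) / 10 = m / 10 ^ (L - 1) := by
          rw [Nat.div_div_eq_div_mul]
          congr 1
          rw [← pow_succ]
          congr 1
          omega
        omega
      have eA2 : PySem.Int.mod ((m / 10 ^ (L - 2) : Nat) : Int) 10 = ((m / 10 ^ (L - 2) % 10 : Nat) : Int) := by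
        rw [PySem.Int.mod_eq_emod_of_pos (by norm_num)]
        omega
      have hcond : ¬ (D.length = 1) := by omega
      simp only [hlast, hsnd, eA1, eA2, hDlen, Option.getD_some, one_mul]
      simp [hL]
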